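-- pv_equiv track=rewrite | github.com/eliottcassidy2000/math | 04-computation/full_cg_allcycles.py | find_directed_odd_cycles_by_vertex_set
-- ===== SOURCE A (Python) =====
-- from itertools import combinations, permutations
--
-- def find_directed_odd_cycles_by_vertex_set(adj, n):
--     """For each subset of odd size, check if it supports a directed cycle.
--     Count each vertex set at most once."""
--     cycles = []
--     for length in range(3, n + 1, 2):
--         for combo in combinations(range(n), length):
--             verts = list(combo)
--             fs = frozenset(combo)
--             for perm in permutations(verts):
--                 is_cycle = True
--                 for idx in range(length):
--                     if not (adj[perm[idx]] & (1 << perm[(idx+1) % length])):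
--                         is_cycle = False
--                         break
--                 if is_cycle:
--                     cycles.append(fs)
--                     break  # one per vertex set
--     return cycles
-- ===== SOURCE B (Python) =====
-- from itertools import combinations
--
-- def find_directed_odd_cycles_by_vertex_set(adj, n):
--     """For each subset of odd size, check if it supports a directed cycle.
--     Count each vertex set at most once.
--
--     Backtracking DFS anchored at the subset's smallest vertex, pruning a
--     partial path as soon as an edge is missing, instead of generate-and-test
--     over all k! permutations."""
--     cycles = []
--     for length in range(3, n + 1, 2):
--         for combo in combinations(range(n), length):
--             verts = list(combo)
--             s = verts[0]
--
--             def dfs(cur, remaining):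
--                 if not remaining:
--                     return (adj[cur] & (1 << s)) != 0
--                 return any((adj[cur] & (1 << v)) != 0
--                            and dfs(v, [w for w in remaining if w != v])
--                            for v in remaining)
--
--             if dfs(s, verts[1:]):
--                 cycles.append(frozenset(combo))
--     return cycles
-- ===== Notes on version B (the rewrite author's own statement) =====
-- stated objective: alternative
-- what changed: Per odd-size vertex subset, B decides Hamiltonian-cycle existence by a backtracking DFS anchored at the subset's first vertex that prunes a partial path at the first missing edge, instead of A's generate-and-test over all k! permutations of the subset; both still enumerate all odd-size subsets, so overall growth stays exponential in n.
import Mathlib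
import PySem

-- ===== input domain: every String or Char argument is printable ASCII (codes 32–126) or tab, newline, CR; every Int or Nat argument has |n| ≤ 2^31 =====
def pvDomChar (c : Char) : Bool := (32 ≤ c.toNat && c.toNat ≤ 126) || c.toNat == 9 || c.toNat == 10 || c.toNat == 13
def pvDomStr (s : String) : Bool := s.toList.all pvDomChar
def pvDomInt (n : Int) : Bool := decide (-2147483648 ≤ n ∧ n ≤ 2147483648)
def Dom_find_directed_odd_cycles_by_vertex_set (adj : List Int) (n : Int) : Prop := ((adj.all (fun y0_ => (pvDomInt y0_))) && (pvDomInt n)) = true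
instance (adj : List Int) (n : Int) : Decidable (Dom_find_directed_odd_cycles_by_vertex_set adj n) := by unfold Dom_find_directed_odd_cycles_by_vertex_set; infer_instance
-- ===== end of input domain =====

-- B replaces A's generate-and-test over all k! permutations of each odd-size vertex subset by a
-- backtracking DFS anchored at the subset's first vertex; same return value on every input A accepts.

-- ===== PORT A =====
-- adj[u] & (1 << v) is truthy  (vertices are drawn from range(n), so v ≥ 0 and toNat is exact)
def pvEdge (adj : List Int) (u v : Int) : Bool :=
  PySem.Int.band (PySem.List.pyGetD adj u 0) ((1 : Int) <<< v.toNat) != 0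

-- A's inner 'for idx in range(length)' check (indices are always in range, so getD is exact)
def pvIsCycle (adj : List Int) (p : List Int) : Bool :=
  (List.range p.length).all (fun i => pvEdge adj (p.getD i 0) (p.getD ((i + 1) % p.length) 0))

def find_directed_odd_cycles_by_vertex_set (adj : List Int) (n : Int) : List (List Int) :=
  (PySem.List.pyRange 3 (n + 1) 2).foldl (fun cycles len =>
    (PySem.List.combinations (PySem.List.pyRange 0 n 1) len.toNat).foldl (fun cycles verts =>
      -- 'for perm in permutations(verts): … if is_cycle: cycles.append(fs); break'
      -- appends fs exactly once iff some permutation passes the check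
      if (PySem.List.permutations verts verts.length).any (pvIsCycle adj) then
        cycles ++ [PySem.Set.ofList verts]
      else cycles) cycles) []

-- ===== PORT B =====
-- 'dfs(cur, remaining)' of Source B: extend the path at cur through remaining, closing back at s
def pvDfs (adj : List Int) (s : Int) (cur : Int) (rem : List Int) : Bool :=
  if rem.isEmpty then pvEdge adj cur s
  else rem.attach.any (fun v =>
    pvEdge adj cur v.1 && pvDfs adj s v.1 (rem.filter (fun w => w != v.1)))
termination_by rem.length
decreasing_by
  simp only [List.length_unattach]
  rw [← List.length_attach (l := rem), List.length_filter_lt_length_iff_exists]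
  exact ⟨v, List.mem_attach _ _, by simp⟩

def find_directed_odd_cycles_by_vertex_set_alt (adj : List Int) (n : Int) : List (List Int) :=
  (PySem.List.pyRange 3 (n + 1) 2).foldl (fun cycles len =>
    (PySem.List.combinations (PySem.List.pyRange 0 n 1) len.toNat).foldl (fun cycles verts =>
      match verts with
      | [] => cycles   -- unreachable: combinations of size ≥ 3 are nonempty
      | s :: rest =>
        if pvDfs adj s s rest then cycles ++ [PySem.Set.ofList (s :: rest)] else cycles)
      cycles) []

-- ===== PRECONDITION & SPEC =====
-- Python A indexes adj[v] for vertices v < n (whenever some odd length 3 ≤ k ≤ n exists),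
-- raising IndexError if adj is shorter than n; exactly those inputs are excluded.
def Pre_find_directed_odd_cycles_by_vertex_set (adj : List Int) (n : Int) : Prop :=
  3 ≤ n → n ≤ (adj.length : Int)
instance (adj : List Int) (n : Int) : Decidable (Pre_find_directed_odd_cycles_by_vertex_set adj n) := by
  unfold Pre_find_directed_odd_cycles_by_vertex_set; infer_instance

def pvWitness_find_directed_odd_cycles_by_vertex_set : List Int × Int := ([2, 4, 1], 3)

def Spec_find_directed_odd_cycles_by_vertex_set (adj : List Int) (n : Int) (out : List (List Int)) : Prop := out = find_directed_odd_cycles_by_vertex_set_alt adj n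
instance (adj : List Int) (n : Int) (out : List (List Int)) : Decidable (Spec_find_directed_odd_cycles_by_vertex_set adj n out) := by unfold Spec_find_directed_odd_cycles_by_vertex_set; infer_instance

-- ===== CLAIM (what is proved, stated in full; the proofs are below) =====
def Claim_equal_find_directed_odd_cycles_by_vertex_set : Prop := ∀ (adj : List Int) (n : Int), Dom_find_directed_odd_cycles_by_vertex_set adj n → Pre_find_directed_odd_cycles_by_vertex_set adj n → Spec_find_directed_odd_cycles_by_vertex_set adj n (find_directed_odd_cycles_by_vertex_set adj n)

-- ===== LEMMAS AND PROOFS =====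

-- pvPath adj s cur q : the edges cur→q₀→q₁→…→qₗ₋₁→s all exist (path through q closing back at s)
def pvPath (adj : List Int) (s : Int) : Int → List Int → Bool
  | cur, [] => pvEdge adj cur s
  | cur, v :: t => pvEdge adj cur v && pvPath adj s v t

-- splitting a closed path at an interior vertex
theorem pvPath_split (adj : List Int) (s0 : Int) (x : List Int) (v : Int) (y : List Int) :
    ∀ cur, pvPath adj s0 cur (x ++ v :: y) = (pvPath adj v cur x && pvPath adj s0 v y) := by
  induction x with
  | nil => intro cur; simp [pvPath]
  | cons w t ih => intro cur; simp [pvPath, ih w, Bool.and_assoc]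

-- index characterisation of pvPath (rest.getD i s wraps the closing edge into the default)
theorem pvPath_iff (adj : List Int) (s : Int) (q : List Int) :
    ∀ cur, (pvPath adj s cur q = true ↔
      ∀ i < q.length + 1, pvEdge adj ((cur :: q).getD i 0) (q.getD i s) = true) := by
  induction q with
  | nil =>
    intro cur
    constructor
    · intro h i hi
      have hi0 : i = 0 := by simpa using hi
      subst hi0
      simpa [pvPath] using h
    · intro h; simpa [pvPath] using h 0 (by omega)
  | cons v t ih =>
    intro cur
    simp only [pvPath, Bool.and_eq_true, ih v]
    constructor
    · rintro ⟨h0, h⟩ i hi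
      cases i with
      | zero => simpa using h0
      | succ j => simpa using h j (by simpa using hi)
    · intro h
      refine ⟨by simpa using h 0 (by omega), fun j hj => ?_⟩
      simpa using h (j + 1) (by simpa using hj)

-- A's index/mod cycle check on a nonempty list is the closed-path check anchored at its head
theorem pvIsCycle_eq_pvPath (adj : List Int) (s : Int) (rest : List Int) :
    pvIsCycle adj (s :: rest) = pvPath adj s s rest := by
  have key : ∀ i < rest.length + 1,
      (s :: rest).getD ((i + 1) % (rest.length + 1)) 0 = rest.getD i s := by
    intro i hi
    by_cases h : i < rest.length
    · rw [Nat.mod_eq_of_lt (by omega)]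
      simp only [List.getD_cons_succ]
      rw [List.getD_eq_getElem _ _ h, List.getD_eq_getElem _ _ h]
    · have : i = rest.length := by omega
      subst this
      rw [Nat.mod_self]
      simp
  have hcyc : pvIsCycle adj (s :: rest) = true ↔
      ∀ i < rest.length + 1, pvEdge adj ((s :: rest).getD i 0) (rest.getD i s) = true := by
    simp only [pvIsCycle, List.all_eq_true, List.mem_range, List.length_cons]
    constructor
    · intro h i hi; rw [← key i hi]; exact h i hi
    · intro h i hi; rw [key i hi]; exact h i hi
  rw [Bool.eq_iff_iff, hcyc, pvPath_iff]

-- the unfolding equation of PySem.List.permutations at a successor count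
theorem perms_succ {α : Type} (xs : List α) (r : Nat) :
    PySem.List.permutations xs (r + 1) =
      (List.range xs.length).flatMap (fun i =>
        match xs[i]? with
        | none => []
        | some x => (PySem.List.permutations (xs.eraseIdx i) r).map (x :: ·)) := rfl

-- every rearrangement of xs occurs in PySem.List.permutations xs xs.length
theorem mem_permutations_of_perm {α : Type} : ∀ (p xs : List α), p.Perm xs →
    p ∈ PySem.List.permutations xs xs.length := by
  intro p
  induction p with
  | nil =>
    intro xs h
    rw [List.Perm.eq_nil h.symm]
    simp [PySem.List.permutations_zero]
  | cons v p' ih =>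
    intro xs h
    have hv : v ∈ xs := h.mem_iff.mp (List.mem_cons_self ..)
    obtain ⟨i, hi, hxi⟩ := List.mem_iff_getElem.mp hv
    have hlen : xs.length = p'.length + 1 := by
      have := h.length_eq; simpa using this.symm
    rw [hlen, perms_succ]
    rw [List.mem_flatMap]
    refine ⟨i, by simpa [← hlen] using hi, ?_⟩
    have hget : xs[i]? = some v := by
      rw [List.getElem?_eq_getElem hi, hxi]
    rw [hget]
    simp only [List.mem_map]
    refine ⟨p', ?_, rfl⟩
    have hperm : p'.Perm (xs.eraseIdx i) := by
      have h1 : xs.Perm (v :: xs.eraseIdx i) := by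
        rw [← hxi]; exact (List.getElem_cons_eraseIdx_perm hi).symm
      exact (h.trans h1).cons_inv
    have hlen2 : (xs.eraseIdx i).length = p'.length := by
      rw [List.length_eraseIdx_of_lt hi, hlen]; omega
    rw [← hlen2]
    exact ih _ hperm

theorem perm_cons_filter_ne (rem : List Int) (v : Int) (hv : v ∈ rem) (hnd : rem.Nodup) :
    rem.Perm (v :: rem.filter (fun w => w != v)) := by
  rw [← List.Nodup.erase_eq_filter hnd v]
  exact List.perm_cons_erase hv

-- correctness of the DFS: it succeeds iff some ordering of rem closes a path back at s
theorem pvDfs_spec_aux (adj : List Int) (s : Int) :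
    ∀ (N : Nat) (rem : List Int), rem.length ≤ N → rem.Nodup → ∀ cur,
      (pvDfs adj s cur rem = true ↔ ∃ q, q.Perm rem ∧ pvPath adj s cur q = true) := by
  intro N
  induction N with
  | zero =>
    intro rem hlen _ cur
    have : rem = [] := List.length_eq_zero_iff.mp (by omega)
    subst this
    rw [pvDfs]
    simp only [List.isEmpty_nil]
    constructor
    · intro h; exact ⟨[], List.Perm.refl _, h⟩
    · rintro ⟨q, hq, hp⟩; rwa [hq.eq_nil] at hp
  | succ N ih =>
    intro rem hlen hnd cur
    rcases hrem : rem with _ | ⟨r, rs⟩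
    · subst hrem
      rw [pvDfs]
      simp only [List.isEmpty_nil]
      constructor
      · intro h; exact ⟨[], List.Perm.refl _, h⟩
      · rintro ⟨q, hq, hp⟩; rwa [hq.eq_nil] at hp
    · subst hrem
      rw [pvDfs, if_neg (by simp), List.any_eq_true]
      constructor
      · rintro ⟨⟨v, hv⟩, -, hvd⟩
        rw [Bool.and_eq_true] at hvd
        obtain ⟨hedge, hdfs⟩ := hvd
        set rem := r :: rs with hr
        set rem' := rem.filter (fun w => w != v) with hrem'
        have hlt : rem'.length < rem.length := by
          rw [hrem', List.length_filter_lt_length_iff_exists]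
          exact ⟨v, hv, by simp⟩
        obtain ⟨q', hq', hp'⟩ := (ih rem' (by omega) (hnd.filter _) v).mp hdfs
        refine ⟨v :: q', ?_, by simp [pvPath, hedge, hp']⟩
        exact ((hq'.cons v).trans (perm_cons_filter_ne rem v hv hnd).symm)
      · rintro ⟨q, hq, hp⟩
        rcases q with _ | ⟨v, q'⟩
        · exact absurd hq.symm.eq_nil (by simp)
        · have hv : v ∈ r :: rs := hq.mem_iff.mp (List.mem_cons_self ..)
          simp only [pvPath, Bool.and_eq_true] at hp
          obtain ⟨hedge, hp'⟩ := hp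
          refine ⟨⟨v, hv⟩, List.mem_attach _ _, ?_⟩
          rw [Bool.and_eq_true]
          refine ⟨hedge, ?_⟩
          set rem := r :: rs with hr
          set rem' := rem.filter (fun w => w != v) with hrem'
          have hlt : rem'.length < rem.length := by
            rw [hrem', List.length_filter_lt_length_iff_exists]
            exact ⟨v, hv, by simp⟩
          have hq' : q'.Perm rem' :=
            (hq.trans (perm_cons_filter_ne rem v hv hnd)).cons_inv
          exact (ih rem' (by omega) (hnd.filter _) v).mpr ⟨q', hq', hp'⟩

-- per-subset equality of the two tests: some permutation of s::rest is a directed cycle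
-- iff the DFS anchored at s succeeds (rotate any witness cycle to start at s, and back)
theorem subset_test_eq (adj : List Int) (s : Int) (rest : List Int) (hnd : (s :: rest).Nodup) :
    (PySem.List.permutations (s :: rest) (s :: rest).length).any (pvIsCycle adj) =
      pvDfs adj s s rest := by
  have hndr : rest.Nodup := (List.nodup_cons.mp hnd).2
  rw [Bool.eq_iff_iff, List.any_eq_true]
  constructor
  · rintro ⟨p, hp, hc⟩
    have hperm : p.Perm (s :: rest) := PySem.List.perm_of_mem_permutations hp
    rcases p with _ | ⟨h, t⟩
    · exact absurd hperm.symm.eq_nil (by simp)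
    rw [pvIsCycle_eq_pvPath] at hc
    have hs : s ∈ h :: t := hperm.mem_iff.mpr (List.mem_cons_self ..)
    rcases List.mem_cons.mp hs with hsh | hst
    · subst hsh
      exact (pvDfs_spec_aux adj s rest.length rest le_rfl hndr s).mpr
        ⟨t, hperm.cons_inv, hc⟩
    · obtain ⟨a, b, rfl⟩ := List.append_of_mem hst
      rw [pvPath_split adj h a s b h, Bool.and_eq_true] at hc
      obtain ⟨hc1, hc2⟩ := hc
      have hq : (b ++ h :: a).Perm rest := by
        have hchain : (s :: (b ++ h :: a)).Perm (s :: rest) :=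
          (((((List.Perm.cons s (List.perm_middle (a := h) (l₁ := b) (l₂ := a))).trans
            (List.Perm.cons s (List.Perm.cons h List.perm_append_comm))).trans
            (List.Perm.swap h s (a ++ b))).trans
            (List.Perm.cons h (List.perm_middle (a := s) (l₁ := a) (l₂ := b)).symm)).trans
            hperm)
        exact hchain.cons_inv
      refine (pvDfs_spec_aux adj s rest.length rest le_rfl hndr s).mpr
        ⟨b ++ h :: a, hq, ?_⟩
      rw [pvPath_split adj s b h a s, Bool.and_eq_true]
      exact ⟨hc2, hc1⟩
  · intro hdfs
    obtain ⟨q, hq, hpath⟩ :=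
      (pvDfs_spec_aux adj s rest.length rest le_rfl hndr s).mp hdfs
    refine ⟨s :: q, ?_, ?_⟩
    · have := mem_permutations_of_perm (s :: q) (s :: rest) (hq.cons s)
      simpa using this
    · rw [pvIsCycle_eq_pvPath]; exact hpath

-- the two programs agree on every input (both are total in Lean): the folds coincide subsetwise
theorem ports_agree (adj : List Int) (n : Int) :
    find_directed_odd_cycles_by_vertex_set adj n = find_directed_odd_cycles_by_vertex_set_alt adj n := by
  unfold find_directed_odd_cycles_by_vertex_set find_directed_odd_cycles_by_vertex_set_alt
  apply PySem.List.foldl_congr_mem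
  intro acc len hlen
  apply PySem.List.foldl_congr_mem
  intro acc2 verts hverts
  have hsub := PySem.List.sublist_of_mem_combinations hverts
  have hlenv := PySem.List.length_of_mem_combinations hverts
  have hnd : verts.Nodup := hsub.nodup (PySem.List.nodup_pyRange_one 0 n)
  have h3 : (3 : Int) ≤ len :=
    (((PySem.List.mem_pyRange_iff_of_pos (by norm_num : (0:Int) < 2)) len).mp hlen).1
  rcases verts with _ | ⟨s, rest⟩
  · exfalso
    simp at hlenv
    omega
  · rw [subset_test_eq adj s rest hnd]

-- ===== VERDICT (by name: the statement is the Claim_ definition above) =====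
theorem find_directed_odd_cycles_by_vertex_set_spec : Claim_equal_find_directed_odd_cycles_by_vertex_set := by
  intro adj n _ _
  unfold Spec_find_directed_odd_cycles_by_vertex_set
  exact ports_agree adj n
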